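-- pv_equiv track=rewrite | github.com/CognacS/tag-cat | tasks/utils/tokenizer.py | tokenizer_rich_str2chars
-- ===== SOURCE A (Python) =====
-- class TokenizationException(Exception):
--     pass
--
-- def extract_special_symbols(sequence):
--     """ Break down a sequence of characters into ordinary strings and special symbols, i.e. strings enclosed in brackes.
--     E.g.
--     Input: "Hi, my name is <PLACEHOLDER>, nice to meet you."
--     Output: "Hi, my name is ", "<PLACEHOLDER>", ", nice to meet you.", where "<PLACEHOLDER>" is flagged as a special symbol.
--
--     Parameters
--     ----------
--     sequence : str
--         sequence of characters containing special symbols, i.e. strings enclosed in brackets.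
--
--     Returns
--     -------
--     final_parts: list[str]
--         broken down pieces of the input sequence, where an element can be an ordinary string, or a special symbol (also a string enclosed by <>).
--     is_special : list[bool]
--         flags indicating whether each element of final_parts is a special symbol or not.
--     """
--
--     final_parts =  []
--     is_special = []
--
--     # split by opening bracket
--     parts = sequence.split('<')
--
--     # check first broken down part (should not have > brackets)
--     if parts[0].find('>') >= 0:
--         raise TokenizationException('found a > bracket with no corresponding opening bracket <')
--     if len(parts[0]) > 0:
--         final_parts.append(parts[0])
--         is_special.append(False)
--
--     # check other broken parts
--     for p in parts[1:]:
--         # find closing brackets in a part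
--         subparts = p.split('>')
--         # a correct example is when there are 2 resulting subparts from the split
--         # even if > is the terminating symbol, split will return 2 elements, where the second element is an empty string
--         if len(subparts) > 2:
--             raise TokenizationException('found a > bracket with no corresponding opening bracket <')
--         elif len(subparts) == 1:
--             raise TokenizationException('found a < bracket with no corresponding closing bracket >')
--         # no errors: append the special symbol
--         final_parts.append(f'<{subparts[0]}>')
--         is_special.append(True)
--         # if the second part is a non-empty string, include it
--         if len(subparts[1]) > 0:
--             final_parts.append(subparts[1])
--             is_special.append(False)
--     return final_parts, is_special
--
-- def tokenizer_str2chars(sequence):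
--     """ Simple tokenizer breaking a string into raw characters
--
--     Parameters
--     ----------
--     sequence : str
--         sequence of characters
--
--     Returns
--     -------
--     final_parts: list[str]
--         sequence of tokens, in this case characters
--     """
--     return list(sequence)
--
-- def tokenizer_rich_str2chars(sequence):
--     """ Rich tokenizer, breaking a string into raw characters and special symbols, enclosed inside brackets <>.
--     E.g.
--     Input: "Hi, my name is <PLACEHOLDER>"
--     Output: "H", "i", ",", "m", "y", " ", "n", "a", "m", "e", " ", "i", "s", " ", "<PLACEHOLDER>"
--
--     Parameters
--     ----------
--     sequence : str
--         sequence of characters, also containing special symbols.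
--
--     Returns
--     -------
--     final_parts: list[str]
--         sequence of tokens, in this case characters and special symbols
--     """
--     parts, is_special_list = extract_special_symbols(sequence)
--     final_parts = []
--
--     for p, is_special in zip(parts, is_special_list):
--         if is_special:
--             final_parts += [p]
--         else:
--             final_parts += tokenizer_str2chars(p)
--
--     return final_parts
-- ===== SOURCE B (Python) =====
-- class TokenizationException(Exception):
--     pass
--
-- def tokenizer_rich_str2chars(sequence):
--     """Single left-to-right scan: chars become tokens; <...> becomes one special token."""
--     tokens = []
--     in_bracket = False
--     buf = []
--     for ch in sequence:
--         if in_bracket: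
--             if ch == '<':
--                 raise TokenizationException('found a < bracket with no corresponding closing bracket >')
--             if ch == '>':
--                 tokens.append('<' + ''.join(buf) + '>')
--                 in_bracket = False
--                 buf = []
--             else:
--                 buf.append(ch)
--         else:
--             if ch == '>':
--                 raise TokenizationException('found a > bracket with no corresponding opening bracket <')
--             if ch == '<':
--                 in_bracket = True
--             else:
--                 tokens.append(ch)
--     if in_bracket:
--         raise TokenizationException('found a < bracket with no corresponding closing bracket >')
--     return tokens
-- ===== Notes on version B (the rewrite author's own statement) =====
-- stated objective: idiomatic
-- what changed: Replaced the split('<')-then-split('>')-per-part two-level decomposition with a single left-to-right character scan carrying an in_bracket flag and a buffer, emitting tokens and raising at the same triggers.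
import Mathlib
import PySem

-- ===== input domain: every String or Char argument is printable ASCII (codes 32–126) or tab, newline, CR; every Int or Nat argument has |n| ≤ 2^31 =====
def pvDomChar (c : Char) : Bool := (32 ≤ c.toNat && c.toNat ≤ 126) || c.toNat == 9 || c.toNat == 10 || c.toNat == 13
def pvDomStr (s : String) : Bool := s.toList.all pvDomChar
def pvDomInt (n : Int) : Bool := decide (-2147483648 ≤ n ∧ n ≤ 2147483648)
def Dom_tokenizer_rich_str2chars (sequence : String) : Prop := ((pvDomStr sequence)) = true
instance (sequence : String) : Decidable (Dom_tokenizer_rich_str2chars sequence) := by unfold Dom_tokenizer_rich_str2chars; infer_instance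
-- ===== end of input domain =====

-- B replaces A's split('<')/split('>') two-level decomposition by a single left-to-right
-- character scan with an in_bracket flag and a buffer (objective: idiomatic; same cost).

-- ===== PORT A =====
-- tokenizer_str2chars(p) = list(p), each element a one-character string
def pvCharTok (cs : List Char) : List String := cs.map (fun c => String.ofList [c])

-- body of the 'for p in parts[1:]' loop of extract_special_symbols (none = raise)
def pvExtractStep (st : Option (List (List Char) × List Bool)) (p : List Char) :
    Option (List (List Char) × List Bool) :=
  st.bind fun fi =>
    let subparts := PySem.Chars.splitOn p ['>']
    if subparts.length > 2 then none
    else if subparts.length = 1 then none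
    else
      let fp := fi.1 ++ [['<'] ++ PySem.List.pyGetD subparts 0 [] ++ ['>']]
      let isp := fi.2 ++ [true]
      if (PySem.List.pyGetD subparts 1 []).length > 0 then
        some (fp ++ [PySem.List.pyGetD subparts 1 []], isp ++ [false])
      else some (fp, isp)

def pvExtractLoop (ps : List (List Char)) (st : Option (List (List Char) × List Bool)) :
    Option (List (List Char) × List Bool) :=
  ps.foldl pvExtractStep st

-- extract_special_symbols (none = TokenizationException)
def pvExtract (cs : List Char) : Option (List (List Char) × List Bool) :=
  let parts := PySem.Chars.splitOn cs ['<']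
  if 0 ≤ PySem.Chars.find (PySem.List.pyGetD parts 0 []) ['>'] then none
  else
    let init :=
      if (PySem.List.pyGetD parts 0 []).length > 0 then ([PySem.List.pyGetD parts 0 []], [false])
      else (([] : List (List Char)), ([] : List Bool))
    pvExtractLoop (PySem.List.slice parts (some 1) none) (some init)

-- final 'for p, is_special in zip(parts, is_special_list)' loop of tokenizer_rich_str2chars
def pvZipTok (fp : List (List Char)) (isp : List Bool) : List String :=
  (fp.zip isp).foldl (fun acc pi => acc ++ (if pi.2 then [String.ofList pi.1] else pvCharTok pi.1)) []

def tokenizer_rich_str2chars (sequence : String) : List String :=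
  match pvExtract sequence.toList with
  | none => []   -- unreachable under Pre_: Python raises TokenizationException here
  | some (parts, flags) => pvZipTok parts flags

-- ===== PORT B =====
-- single scan: state = (in_bracket, buf, tokens); none = TokenizationException
def pvAltLoop : List Char → Bool → List Char → List String → Option (List String)
  | [], true, _, _ => none
  | [], false, _, acc => some acc
  | c :: rest, true, buf, acc =>
      if c = '<' then none
      else if c = '>' then pvAltLoop rest false [] (acc ++ [String.ofList ('<' :: buf ++ ['>'])])
      else pvAltLoop rest true (buf ++ [c]) acc
  | c :: rest, false, buf, acc =>
      if c = '>' then none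
      else if c = '<' then pvAltLoop rest true [] acc
      else pvAltLoop rest false buf (acc ++ [String.ofList [c]])

def tokenizer_rich_str2chars_alt (sequence : String) : List String :=
  (pvAltLoop sequence.toList false [] []).getD []

-- ===== PRECONDITION & SPEC =====
-- Pre_ excludes exactly the inputs on which A raises TokenizationException (stray '>',
-- unclosed or nested '<'): bracket depth, read off prefix counts, stays in {0,1} and ends at 0.
def Pre_tokenizer_rich_str2chars (sequence : String) : Prop :=
  (∀ p ∈ sequence.toList.inits,
      p.count '>' ≤ p.count '<' ∧ p.count '<' ≤ p.count '>' + 1) ∧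
  sequence.toList.count '<' = sequence.toList.count '>'
instance (sequence : String) : Decidable (Pre_tokenizer_rich_str2chars sequence) := by
  unfold Pre_tokenizer_rich_str2chars; infer_instance

def pvWitness_tokenizer_rich_str2chars : String := "hi <A> b"

def Spec_tokenizer_rich_str2chars (sequence : String) (out : List String) : Prop :=
  out = tokenizer_rich_str2chars_alt sequence
instance (sequence : String) (out : List String) : Decidable (Spec_tokenizer_rich_str2chars sequence out) := by
  unfold Spec_tokenizer_rich_str2chars; infer_instance

-- ===== CLAIM (what is proved, stated in full; the proofs are below) =====
def Claim_equal_tokenizer_rich_str2chars : Prop := ∀ (sequence : String), Dom_tokenizer_rich_str2chars sequence → Pre_tokenizer_rich_str2chars sequence → Spec_tokenizer_rich_str2chars sequence (tokenizer_rich_str2chars sequence)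


lemma pv_go_spec (c : Char) : ∀ (fuel : Nat) (l cur : List Char) (acc : List (List Char)),
    l.length ≤ fuel →
    PySem.Chars.splitOn.go [c] fuel l cur acc
      = acc.reverse ++ (List.splitOnP (· == c) l).modifyHead (fun h => cur.reverse ++ h) := by
  intro fuel
  induction fuel with
  | zero =>
    intro l cur acc h
    have : l = [] := List.eq_nil_of_length_eq_zero (by omega)
    subst this
    simp [PySem.Chars.splitOn.go, List.splitOnP_nil]
  | succ f ih =>
    intro l cur acc h
    cases l with
    | nil => simp [PySem.Chars.splitOn.go, List.splitOnP_nil]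
    | cons x rest =>
      by_cases hx : x = c
      · subst hx
        rw [show PySem.Chars.splitOn.go [x] (f+1) (x :: rest) cur acc
              = PySem.Chars.splitOn.go [x] f rest [] (cur.reverse :: acc) by
            simp [PySem.Chars.splitOn.go, List.isPrefixOf]]
        rw [ih rest [] (cur.reverse :: acc) (by simp at h; omega)]
        rw [List.splitOnP_cons]
        simp
        cases List.splitOnP (· == x) rest <;> simp
      · rw [show PySem.Chars.splitOn.go [c] (f+1) (x :: rest) cur acc
              = PySem.Chars.splitOn.go [c] f rest (x :: cur) acc by
            simp [PySem.Chars.splitOn.go, List.isPrefixOf, Ne.symm hx]]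
        rw [ih rest (x :: cur) acc (by simp at h; omega)]
        rw [List.splitOnP_cons]
        simp [hx]
        obtain ⟨hh, t, ht⟩ := List.exists_cons_of_ne_nil (List.splitOnP_ne_nil (· == c) rest)
        rw [ht]
        simp

lemma pv_splitOn_eq (cs : List Char) (c : Char) :
    PySem.Chars.splitOn cs [c] = List.splitOnP (· == c) cs := by
  unfold PySem.Chars.splitOn
  rw [pv_go_spec c (cs.length + 1) cs [] [] (by omega)]
  simp
  cases List.splitOnP (· == c) cs <;> simp

lemma pv_splitOnP_append {α : Type} (p : α → Bool) (xs ys : List α) (h : ∀ x ∈ xs, ¬ p x) :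
    List.splitOnP p (xs ++ ys) = (List.splitOnP p ys).modifyHead (fun h => xs ++ h) := by
  induction xs with
  | nil =>
    obtain ⟨hh, tt, ht⟩ := List.exists_cons_of_ne_nil (List.splitOnP_ne_nil p ys)
    simp [ht]
  | cons x t ih =>
    rw [List.cons_append, List.splitOnP_cons]
    have hx : ¬ p x := h x (by simp)
    simp only [hx, if_neg, Bool.false_eq_true, not_false_eq_true]
    rw [ih (fun y hy => h y (by simp [hy]))]
    obtain ⟨hh, tt, ht⟩ := List.exists_cons_of_ne_nil (List.splitOnP_ne_nil p ys)
    rw [ht]; simp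

lemma pv_splitOnP_head {α : Type} (p : α → Bool) (l : List α) :
    ∃ t, List.splitOnP p l = l.takeWhile (fun x => !p x) :: t := by
  induction l with
  | nil => exact ⟨[], by simp [List.splitOnP_nil]⟩
  | cons x xs ih =>
    obtain ⟨t, ht⟩ := ih
    by_cases hx : p x
    · exact ⟨List.splitOnP p xs, by simp [List.splitOnP_cons, hx, List.takeWhile]⟩
    · refine ⟨t, ?_⟩
      rw [List.splitOnP_cons, ht]
      simp [hx, List.takeWhile]

lemma pv_singleton_infix {α : Type} [DecidableEq α] (a : α) (l : List α) :
    [a] <:+: l ↔ a ∈ l := by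
  constructor
  · intro h; exact h.mem (by simp)
  · intro h
    obtain ⟨s, t, hst, -⟩ := List.eq_append_cons_of_mem h
    exact ⟨s, t, by simp [hst]⟩

lemma pv_find_neg (pre : List Char) (c : Char) (h : c ∉ pre) :
    PySem.Chars.find pre [c] = -1 := by
  rw [PySem.Chars.find_eq_neg_one_iff]
  rw [pv_singleton_infix]
  exact h

lemma pv_extractLoop_none (ps : List (List Char)) : pvExtractLoop ps none = none := by
  induction ps with
  | nil => rfl
  | cons p t ih => simpa [pvExtractLoop, pvExtractStep] using ih

lemma pv_prepend_comp (o : Option (List (List Char) × List Bool))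
    (fp fp' : List (List Char)) (isp isp' : List Bool) :
    (o.map (fun r => (fp' ++ r.1, isp' ++ r.2))).map (fun r => (fp ++ r.1, isp ++ r.2))
      = o.map (fun r => ((fp ++ fp') ++ r.1, (isp ++ isp') ++ r.2)) := by
  cases o <;> simp

lemma pv_extractStep_prepend (p : List Char) (fp : List (List Char)) (isp : List Bool) :
    pvExtractStep (some (fp, isp)) p
      = (pvExtractStep (some ([], [])) p).map (fun r => (fp ++ r.1, isp ++ r.2)) := by
  unfold pvExtractStep
  simp only [Option.bind_some]
  split_ifs <;> simp

lemma pv_extractLoop_prepend : ∀ (ps : List (List Char)) (fp : List (List Char)) (isp : List Bool),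
    pvExtractLoop ps (some (fp, isp))
      = (pvExtractLoop ps (some ([], []))).map (fun r => (fp ++ r.1, isp ++ r.2)) := by
  intro ps
  induction ps with
  | nil => intro fp isp; simp [pvExtractLoop]
  | cons p t ih =>
    intro fp isp
    show pvExtractLoop t (pvExtractStep (some (fp, isp)) p)
      = (pvExtractLoop t (pvExtractStep (some ([], [])) p)).map _
    rw [pv_extractStep_prepend]
    cases hstep : pvExtractStep (some ([], [])) p with
    | none => simp [pv_extractLoop_none]
    | some r =>
      obtain ⟨r1, r2⟩ := r
      simp only [Option.map_some]
      rw [ih (fp ++ r1) (isp ++ r2), ih r1 r2, pv_prepend_comp]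

lemma pv_altLoop_prepend : ∀ (cs : List Char) (b : Bool) (buf : List Char) (acc : List String),
    pvAltLoop cs b buf acc = (pvAltLoop cs b buf []).map (acc ++ ·) := by
  intro cs
  induction cs with
  | nil => intro b buf acc; cases b <;> simp [pvAltLoop]
  | cons c rest ih =>
    intro b buf acc
    cases b <;> simp only [pvAltLoop] <;> split_ifs
    · rfl
    · exact ih true [] acc
    · rw [ih _ _ (acc ++ [String.ofList [c]]), ih _ _ ([] ++ [String.ofList [c]])]
      cases pvAltLoop rest false buf [] <;> simp
    · rfl
    · rw [ih _ _ (acc ++ [String.ofList ('<' :: buf ++ ['>'])]),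
          ih _ _ ([] ++ [String.ofList ('<' :: buf ++ ['>'])])]
      cases pvAltLoop rest false [] [] <;> simp
    · exact ih true (buf ++ [c]) acc

lemma pv_altLoop_text : ∀ (xs rest : List Char), (∀ c ∈ xs, c ≠ '<' ∧ c ≠ '>') →
    ∀ (buf : List Char) (acc : List String),
    pvAltLoop (xs ++ rest) false buf acc = pvAltLoop rest false buf (acc ++ pvCharTok xs) := by
  intro xs
  induction xs with
  | nil => intro rest _ buf acc; simp [pvCharTok]
  | cons x t ih =>
    intro rest h buf acc
    obtain ⟨hx1, hx2⟩ := h x (by simp)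
    rw [List.cons_append]
    simp only [pvAltLoop, hx1, hx2, if_false]
    rw [ih rest (fun c hc => h c (by simp [hc])) buf (acc ++ [String.ofList [x]])]
    simp [pvCharTok]

lemma pv_altLoop_mid : ∀ (mid rest : List Char), (∀ c ∈ mid, c ≠ '<' ∧ c ≠ '>') →
    ∀ (buf : List Char) (acc : List String),
    pvAltLoop (mid ++ '>' :: rest) true buf acc
      = pvAltLoop rest false [] (acc ++ [String.ofList ('<' :: (buf ++ mid) ++ ['>'])]) := by
  intro mid
  induction mid with
  | nil => intro rest _ buf acc; simp [pvAltLoop]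
  | cons x t ih =>
    intro rest h buf acc
    obtain ⟨hx1, hx2⟩ := h x (by simp)
    rw [List.cons_append]
    simp only [pvAltLoop, hx1, hx2, if_false]
    rw [ih rest (fun c hc => h c (by simp [hc])) (buf ++ [x]) acc]
    simp

lemma pv_zipTok_flat (fp : List (List Char)) (isp : List Bool) :
    pvZipTok fp isp = (fp.zip isp).flatMap (fun pi => if pi.2 then [String.ofList pi.1] else pvCharTok pi.1) := by
  unfold pvZipTok
  rw [PySem.List.foldl_append_eq_flatMap]
  simp

lemma pv_zipTok_append (fp1 fp2 : List (List Char)) (isp1 isp2 : List Bool)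
    (h : fp1.length = isp1.length) :
    pvZipTok (fp1 ++ fp2) (isp1 ++ isp2) = pvZipTok fp1 isp1 ++ pvZipTok fp2 isp2 := by
  rw [pv_zipTok_flat, pv_zipTok_flat, pv_zipTok_flat, List.zip_append h, List.flatMap_append]

def pvBal (cs : List Char) : Prop :=
  (∀ p ∈ cs.inits, p.count '>' ≤ p.count '<' ∧ p.count '<' ≤ p.count '>' + 1) ∧
  cs.count '<' = cs.count '>'

lemma pv_bal_decomp (cs : List Char) (hb : pvBal cs) :
    (('<' ∉ cs) ∧ ('>' ∉ cs)) ∨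
    ∃ pre mid rest2, cs = pre ++ '<' :: (mid ++ '>' :: rest2) ∧
      (∀ c ∈ pre, c ≠ '<' ∧ c ≠ '>') ∧ (∀ c ∈ mid, c ≠ '<' ∧ c ≠ '>') ∧ pvBal rest2 := by
  obtain ⟨hball, hbtot⟩ := hb
  by_cases hlt : '<' ∈ cs
  · obtain ⟨pre, rest, hcs, hprelt⟩ := List.eq_append_cons_of_mem hlt
    have hpreP : pre <+: cs := ⟨'<' :: rest, by rw [hcs]⟩
    have hpre := hball pre ((List.mem_inits _ _).mpr hpreP)
    have hc1 : pre.count '<' = 0 := List.count_eq_zero.mpr hprelt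
    have hpregt : '>' ∉ pre := List.count_eq_zero.mp (by omega)
    have hprefree : ∀ c ∈ pre, c ≠ '<' ∧ c ≠ '>' :=
      fun c hc => ⟨fun h => hprelt (h ▸ hc), fun h => hpregt (h ▸ hc)⟩
    have hsplit : rest.takeWhile (fun x => !(x = '<' || x = '>'))
        ++ rest.dropWhile (fun x => !(x = '<' || x = '>')) = rest :=
      List.takeWhile_append_dropWhile
    set mid := rest.takeWhile (fun x => !(x = '<' || x = '>')) with hmiddef
    have hmidfree : ∀ c ∈ mid, c ≠ '<' ∧ c ≠ '>' := by
      intro c hc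
      have := List.mem_takeWhile_imp hc
      simp at this
      exact this
    have hmidlt : mid.count '<' = 0 :=
      List.count_eq_zero.mpr (fun h => (hmidfree _ h).1 rfl)
    have hmidgt : mid.count '>' = 0 :=
      List.count_eq_zero.mpr (fun h => (hmidfree _ h).2 rfl)
    cases hdw : rest.dropWhile (fun x => !(x = '<' || x = '>')) with
    | nil =>
      exfalso
      have hrest : rest = mid := by rw [← hsplit, hdw]; simp
      have := hbtot
      rw [hcs, hrest] at this
      simp [List.count_append, hmidlt, hmidgt, hc1,
        List.count_eq_zero.mpr hpregt] at this
    | cons d rest2 =>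
      have hd : d = '<' ∨ d = '>' := by
        have hne : rest.dropWhile (fun x => !(x = '<' || x = '>')) ≠ [] := by rw [hdw]; simp
        have h2 := List.head_dropWhile_not (fun x => !(x = '<' || x = '>')) hne
        simp only [hdw, List.head_cons] at h2
        by_cases hdl : d = '<'
        · exact Or.inl hdl
        · simp [hdl] at h2
          exact Or.inr h2
      have hrest : rest = mid ++ d :: rest2 := by rw [← hsplit, hdw]
      rcases hd with hdlt | hdgt
      · exfalso
        subst hdlt
        have hq : pre ++ '<' :: (mid ++ ['<']) <+: cs := by
          rw [hcs, hrest]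
          exact ⟨rest2, by simp⟩
        have := hball _ ((List.mem_inits _ _).mpr hq)
        simp [List.count_append, hmidlt, hmidgt, hc1,
          List.count_eq_zero.mpr hpregt] at this
      · subst hdgt
        right
        refine ⟨pre, mid, rest2, by rw [hcs, hrest], hprefree, hmidfree, ?_, ?_⟩
        · intro q hq
          have hqpre : pre ++ '<' :: (mid ++ '>' :: q) <+: cs := by
            obtain ⟨t, ht⟩ := (List.mem_inits _ _).mp hq
            rw [hcs, hrest, ← ht]
            exact ⟨t, by simp⟩
          have := hball _ ((List.mem_inits _ _).mpr hqpre)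
          simp [List.count_append, hmidlt, hmidgt, hc1,
            List.count_eq_zero.mpr hpregt] at this
          omega
        · have := hbtot
          rw [hcs, hrest] at this
          simp [List.count_append, hmidlt, hmidgt, hc1,
            List.count_eq_zero.mpr hpregt] at this
          omega
  · left
    have hc1 : cs.count '<' = 0 := List.count_eq_zero.mpr hlt
    exact ⟨hlt, List.count_eq_zero.mp (by omega)⟩

lemma pv_main : ∀ (n : Nat) (cs : List Char), cs.length < n → pvBal cs →
    ∃ fp isp, pvExtract cs = some (fp, isp) ∧ fp.length = isp.length ∧
      pvAltLoop cs false [] [] = some (pvZipTok fp isp) := by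
  intro n
  induction n with
  | zero => intro cs h; omega
  | succ n ih =>
    intro cs hlen hb
    rcases pv_bal_decomp cs hb with ⟨hlt, hgt⟩ | ⟨pre, mid, rest2, hcs, hpre, hmid, hbal2⟩
    · -- no brackets at all: one ordinary part
      have hparts : PySem.Chars.splitOn cs ['<'] = [cs] := by
        rw [pv_splitOn_eq]
        exact List.splitOnP_eq_single _ _ (fun x hx => by simp; exact fun h => hlt (h ▸ hx))
      have hfind := pv_find_neg cs '>' hgt
      by_cases hnil : cs = []
      · subst hnil
        exact ⟨[], [], by decide, rfl, by decide⟩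
      · refine ⟨[cs], [false], ?_, rfl, ?_⟩
        · simp only [pvExtract, hparts, PySem.List.pyGetD_zero_cons, hfind]
          norm_num [List.length_pos_iff, hnil, PySem.List.slice_from_one]
          rfl
        · have := pv_altLoop_text cs [] (fun c hc => ⟨fun h => hlt (h ▸ hc), fun h => hgt (h ▸ hc)⟩) [] []
          simp only [List.append_nil] at this
          rw [this]
          simp [pvAltLoop, pvZipTok]
    · -- cs = pre ++ '<' :: (mid ++ '>' :: rest2)
      subst hcs
      have hlen2 : rest2.length < n := by simp at hlen; omega
      obtain ⟨fp', isp', hA2, hl2, hB2⟩ := ih rest2 hlen2 hbal2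
      -- the first part of rest2 before its next '<'
      obtain ⟨t0, hsp0⟩ := pv_splitOnP_head (· == '<') rest2
      set h0 := rest2.takeWhile (fun x => !(x == '<')) with hh0def
      have hh0lt : ∀ c ∈ h0, c ≠ '<' := by
        intro c hc
        have := List.mem_takeWhile_imp hc
        simpa using this
      have hh0gt : '>' ∉ h0 := by
        have hcnt := hbal2.1 h0 ((List.mem_inits _ _).mpr (List.takeWhile_prefix _))
        have : h0.count '<' = 0 := List.count_eq_zero.mpr (fun h => hh0lt _ h rfl)
        exact List.count_eq_zero.mp (by omega)
      have hpregt : '>' ∉ pre := fun h => (hpre _ h).2 rfl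
      -- A side: the split by '<'
      have hparts : PySem.Chars.splitOn (pre ++ '<' :: (mid ++ '>' :: rest2)) ['<']
          = pre :: (mid ++ '>' :: h0) :: t0 := by
        rw [pv_splitOn_eq]
        rw [List.splitOnP_first _ pre (fun x hx => by simp; exact (hpre x hx).1) '<' (by simp)]
        rw [show mid ++ '>' :: rest2 = (mid ++ ['>']) ++ rest2 by simp]
        rw [pv_splitOnP_append _ _ _ (fun x hx => by
          simp at hx
          rcases hx with hx | hx
          · simp [(hmid x hx).1]
          · simp [hx])]
        rw [hsp0]
        simp
      -- the special part splits in two by '>'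
      have hsub : PySem.Chars.splitOn (mid ++ '>' :: h0) ['>'] = [mid, h0] := by
        rw [pv_splitOn_eq]
        rw [List.splitOnP_first _ mid (fun x hx => by simp; exact (hmid x hx).2) '>' (by simp)]
        rw [List.splitOnP_eq_single _ _ (fun x hx => by simp; exact fun h => hh0gt (h ▸ hx))]
      -- initial segment and the piece after the bracket, as they enter the state
      set a1 : List (List Char) := if 0 < pre.length then [pre] else [] with ha1
      set b1 : List Bool := if 0 < pre.length then [false] else [] with hb1
      set a2 : List (List Char) := if 0 < h0.length then [h0] else [] with ha2
      set b2 : List Bool := if 0 < h0.length then [false] else [] with hb2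
      set tk : List Char := ['<'] ++ mid ++ ['>'] with htk
      -- what pvExtract computes on rest2
      have hEr : pvExtract rest2 = pvExtractLoop t0 (some (a2, b2)) := by
        simp only [pvExtract, pv_splitOn_eq, hsp0, PySem.List.pyGetD_zero_cons,
          pv_find_neg h0 '>' hh0gt, PySem.List.slice_from_one]
        norm_num
        congr 1
        split_ifs with hh <;> simp [ha2, hb2, hh]
      rw [hEr, pv_extractLoop_prepend] at hA2
      cases hbm : pvExtractLoop t0 (some ([], [])) with
      | none => rw [hbm] at hA2; simp at hA2
      | some r =>
        obtain ⟨r1, r2⟩ := r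
        rw [hbm] at hA2
        simp only [Option.map_some, Option.some.injEq, Prod.mk.injEq] at hA2
        obtain ⟨hfp', hisp'⟩ := hA2
        have h1 : a1.length = b1.length := by
          rcases Nat.eq_zero_or_pos pre.length with hh | hh <;> simp [ha1, hb1, hh]
        have h2 : a2.length = b2.length := by
          rcases Nat.eq_zero_or_pos h0.length with hh | hh <;> simp [ha2, hb2, hh]
        have h3 : r1.length = r2.length := by
          have h4 : (a2 ++ r1).length = (b2 ++ r2).length := by rw [hfp', hisp']; exact hl2
          simp at h4; omega
        have hz1 : pvZipTok a1 b1 = pvCharTok pre := by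
          rcases Nat.eq_zero_or_pos pre.length with hp | hp
          · simp [ha1, hb1, List.length_eq_zero_iff.mp hp, pvZipTok, pvCharTok]
          · simp [ha1, hb1, hp, pvZipTok]
        have hz2 : pvZipTok [tk] [true] = [String.ofList tk] := by simp [pvZipTok]
        -- the loop step on the bracketed part
        have hstep : pvExtractStep (some (a1, b1)) (mid ++ '>' :: h0)
            = some ((a1 ++ [tk]) ++ a2, (b1 ++ [true]) ++ b2) := by
          unfold pvExtractStep
          simp only [Option.bind_some, hsub]
          rw [show PySem.List.pyGetD [mid, h0] 0 [] = mid from rfl,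
              show PySem.List.pyGetD [mid, h0] 1 [] = h0 from rfl]
          norm_num
          rcases Nat.eq_zero_or_pos h0.length with hh | hh
          · simp [ha2, hb2, htk, List.length_eq_zero_iff.mp hh]
          · simp [ha2, hb2, htk, hh]
        -- what pvExtract computes on the whole input
        have hEc : pvExtract (pre ++ '<' :: (mid ++ '>' :: rest2))
            = pvExtractLoop t0 (some ((a1 ++ [tk]) ++ a2, (b1 ++ [true]) ++ b2)) := by
          simp only [pvExtract, hparts, PySem.List.pyGetD_zero_cons,
            pv_find_neg pre '>' hpregt, PySem.List.slice_from_one]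
          norm_num
          have hi : (if 0 < pre.length then ([pre], [false])
              else (([] : List (List Char)), ([] : List Bool))) = (a1, b1) := by
            split_ifs with hh <;> simp [ha1, hb1, hh]
          rw [hi]
          show pvExtractLoop t0 (pvExtractStep (some (a1, b1)) (mid ++ '>' :: h0)) = _
          rw [hstep]
          simp
        refine ⟨(a1 ++ [tk]) ++ a2 ++ r1, (b1 ++ [true]) ++ b2 ++ r2, ?_, ?_, ?_⟩
        · rw [hEc, pv_extractLoop_prepend, hbm]
          simp
        · simp
          omega
        · -- B side: scan pre, open the bracket, scan mid, close, recurse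
          have htext := pv_altLoop_text pre ('<' :: (mid ++ '>' :: rest2)) hpre [] []
          rw [htext]
          simp only [List.nil_append]
          rw [show pvAltLoop ('<' :: (mid ++ '>' :: rest2)) false [] (pvCharTok pre)
              = pvAltLoop (mid ++ '>' :: rest2) true [] (pvCharTok pre) from by simp [pvAltLoop]]
          rw [pv_altLoop_mid mid rest2 hmid [] (pvCharTok pre)]
          rw [pv_altLoop_prepend, hB2]
          simp only [Option.map_some, Option.some.injEq]
          rw [show (a1 ++ [tk]) ++ a2 ++ r1 = (a1 ++ [tk]) ++ (a2 ++ r1) from by simp,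
              show (b1 ++ [true]) ++ b2 ++ r2 = (b1 ++ [true]) ++ (b2 ++ r2) from by simp,
              hfp', hisp',
              pv_zipTok_append _ _ _ _ (by simp [h1]),
              pv_zipTok_append _ _ _ _ h1,
              hz1, hz2]
          simp [htk]

-- ===== VERDICT (by name: the statement is the Claim_ definition above) =====
theorem tokenizer_rich_str2chars_spec : Claim_equal_tokenizer_rich_str2chars := by
  intro s _hd hpre
  obtain ⟨fp, isp, hA, _hlen, hB⟩ := pv_main (s.toList.length + 1) s.toList (by omega) hpre
  unfold Spec_tokenizer_rich_str2chars tokenizer_rich_str2chars tokenizer_rich_str2chars_alt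
  rw [hA, hB]
  rfl
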